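-- pv_equiv track=rewrite | github.com/yumikopubangelo/library-of-babylon | scripts/archive_automation/lyrics_processor.py | split_by_structure
-- ===== SOURCE A (Python) =====
-- from typing import Optional, Dict, Any
--
-- def split_by_structure(
--     lyrics_text: str,
--     structure_markers: Optional[Dict[str, str]] = None
-- ) -> Dict[str, str]:
--     """
--     Split lyrics into structural sections (verse, chorus, bridge, etc.)
--
--     Args:
--         lyrics_text: Full lyrics text
--         structure_markers: Dict mapping markers to section types
--                           e.g., {"[Verse 1]": "verse1", "[Chorus]": "chorus"}
--
--     Returns:
--         Dictionary of section_name: section_text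
--     """
--     if not structure_markers:
--         # Default markers
--         structure_markers = {
--             "[Verse 1]": "verse1",
--             "[Verse 2]": "verse2",
--             "[Verse 3]": "verse3",
--             "[Chorus]": "chorus",
--             "[Pre-Chorus]": "pre_chorus",
--             "[Bridge]": "bridge",
--             "[Outro]": "outro",
--             "[Intro]": "intro"
--         }
--
--     sections = {}
--     current_section = "unlabeled"
--     current_text = []
--
--     for line in lyrics_text.split('\n'):
--         # Check if line is a structure marker
--         found_marker = False
--         for marker, section_name in structure_markers.items():
--             if marker.lower() in line.lower():
--                 # Save previous section
--                 if current_text: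
--                     sections[current_section] = '\n'.join(current_text).strip()
--                 # Start new section
--                 current_section = section_name
--                 current_text = []
--                 found_marker = True
--                 break
--
--         if not found_marker:
--             current_text.append(line)
--
--     # Save final section
--     if current_text:
--         sections[current_section] = '\n'.join(current_text).strip()
--
--     return sections
-- ===== SOURCE B (Python) =====
-- from typing import Optional, Dict
--
-- def split_by_structure(
--     lyrics_text: str,
--     structure_markers: Optional[Dict[str, str]] = None
-- ) -> Dict[str, str]:
--     if not structure_markers:
--         structure_markers = {
--             "[Verse 1]": "verse1",
--             "[Verse 2]": "verse2",
--             "[Verse 3]": "verse3",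
--             "[Chorus]": "chorus",
--             "[Pre-Chorus]": "pre_chorus",
--             "[Bridge]": "bridge",
--             "[Outro]": "outro",
--             "[Intro]": "intro",
--         }
--
--     # Pass 1: locate marker lines (markers lowercased once, not per line).
--     lowered = [(marker.lower(), name) for marker, name in structure_markers.items()]
--     lines = lyrics_text.split('\n')
--     marks = []
--     for i, line in enumerate(lines):
--         low = line.lower()
--         for marker, name in lowered:
--             if marker in low:
--                 marks.append((i, name))
--                 break
--
--     # Pass 2: slice the line list between consecutive marker positions.
--     sections = {}
--     name, start = "unlabeled", 0
--     for i, nxt in marks: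
--         seg = lines[start:i]
--         if seg:
--             sections[name] = '\n'.join(seg).strip()
--         name, start = nxt, i + 1
--     seg = lines[start:]
--     if seg:
--         sections[name] = '\n'.join(seg).strip()
--     return sections
-- ===== Notes on version B (the rewrite author's own statement) =====
-- stated objective: alternative
-- what changed: B first locates marker-line positions (with markers lowercased once) and then builds each section by slicing the line list between consecutive marker positions, instead of A's single pass that accumulates a mutable text buffer and re-lowercases every marker on every line.
import Mathlib
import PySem

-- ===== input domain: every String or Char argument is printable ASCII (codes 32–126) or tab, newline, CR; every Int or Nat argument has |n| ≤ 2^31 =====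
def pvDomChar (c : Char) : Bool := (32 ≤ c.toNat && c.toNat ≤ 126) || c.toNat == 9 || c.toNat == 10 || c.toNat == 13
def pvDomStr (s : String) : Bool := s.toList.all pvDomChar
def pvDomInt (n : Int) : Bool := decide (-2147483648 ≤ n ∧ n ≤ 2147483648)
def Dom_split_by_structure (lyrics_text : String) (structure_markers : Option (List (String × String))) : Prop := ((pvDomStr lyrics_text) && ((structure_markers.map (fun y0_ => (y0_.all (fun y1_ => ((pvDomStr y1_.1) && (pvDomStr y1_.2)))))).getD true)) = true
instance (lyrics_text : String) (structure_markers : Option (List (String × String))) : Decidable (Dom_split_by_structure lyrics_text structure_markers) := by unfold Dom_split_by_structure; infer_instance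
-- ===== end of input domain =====

-- B separates classification from grouping: it records the positions of marker lines
-- (markers lowercased once) and then slices the line list between consecutive marker
-- positions, instead of A's single pass with a mutable text buffer; same cost class.

-- ===== PORT A =====
def pvDefaults : List (String × String) :=
  [("[Verse 1]", "verse1"), ("[Verse 2]", "verse2"), ("[Verse 3]", "verse3"),
   ("[Chorus]", "chorus"), ("[Pre-Chorus]", "pre_chorus"), ("[Bridge]", "bridge"),
   ("[Outro]", "outro"), ("[Intro]", "intro")]

-- A's inner 'for marker, section_name in structure_markers.items(): … break'
def pvFindA : List (String × String) → String → Option String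
  | [], _ => none
  | (m, name) :: rest, line =>
      if PySem.Str.isIn (PySem.Str.lower m) (PySem.Str.lower line) then some name
      else pvFindA rest line

-- "if current_text: sections[current_section] = '\n'.join(current_text).strip()"
def pvFlushA (d : PySem.Dict String String) (cur : String) (buf : List String) :
    PySem.Dict String String :=
  if buf.isEmpty then d else d.insert cur (PySem.Str.strip (PySem.Str.join "\n" buf))

def pvStepA (markers : List (String × String))
    (st : PySem.Dict String String × String × List String) (line : String) :
    PySem.Dict String String × String × List String :=
  match pvFindA markers line with
  | some name => (pvFlushA st.1 st.2.1 st.2.2, name, [])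
  | none => (st.1, st.2.1, st.2.2 ++ [line])

def split_by_structure (lyrics_text : String)
    (structure_markers : Option (List (String × String))) : List (String × String) :=
  let markers := match structure_markers with
    | none => pvDefaults
    | some [] => pvDefaults
    | some ms => ms
  let st := ((PySem.Str.split? lyrics_text "\n").getD []).foldl (pvStepA markers)
      (PySem.Dict.empty, "unlabeled", [])
  (pvFlushA st.1 st.2.1 st.2.2).items

-- ===== PORT B =====
def pvDefaultsB : List (String × String) :=
  [("[Verse 1]", "verse1"), ("[Verse 2]", "verse2"), ("[Verse 3]", "verse3"),
   ("[Chorus]", "chorus"), ("[Pre-Chorus]", "pre_chorus"), ("[Bridge]", "bridge"),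
   ("[Outro]", "outro"), ("[Intro]", "intro")]

-- B's inner scan over the pre-lowered markers
def pvFirstB : List (String × String) → String → Option String
  | [], _ => none
  | (m, name) :: rest, low =>
      if PySem.Str.isIn m low then some name else pvFirstB rest low

-- pass 1 body: append (i, name) when the line carries a marker
def pvMarkStepB (lowered : List (String × String))
    (acc : List (Int × String)) (p : Int × String) : List (Int × String) :=
  match pvFirstB lowered (PySem.Str.lower p.2) with
  | some name => acc ++ [(p.1, name)]
  | none => acc

-- pass 2 body: store lines[start:i] (if non-empty), move to (name, i+1)
def pvSecStepB (lines : List String)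
    (st : PySem.Dict String String × String × Int) (p : Int × String) :
    PySem.Dict String String × String × Int :=
  let seg := PySem.List.slice lines (some st.2.2) (some p.1)
  ((if seg.isEmpty then st.1
    else st.1.insert st.2.1 (PySem.Str.strip (PySem.Str.join "\n" seg))), p.2, p.1 + 1)

def split_by_structure_alt (lyrics_text : String)
    (structure_markers : Option (List (String × String))) : List (String × String) :=
  let markers := match structure_markers with
    | some (m :: ms) => m :: ms
    | _ => pvDefaultsB
  let lowered := markers.map (fun p => (PySem.Str.lower p.1, p.2))
  let lines := (PySem.Str.split? lyrics_text "\n").getD []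
  let marks := (PySem.List.enumerate lines 0).foldl (pvMarkStepB lowered) []
  let st := marks.foldl (pvSecStepB lines) (PySem.Dict.empty, "unlabeled", 0)
  let seg := PySem.List.slice lines (some st.2.2) none
  ((if seg.isEmpty then st.1
    else st.1.insert st.2.1 (PySem.Str.strip (PySem.Str.join "\n" seg)))).items

-- ===== PRECONDITION & SPEC =====
def Spec_split_by_structure (lyrics_text : String) (structure_markers : Option (List (String × String))) (out : List (String × String)) : Prop := out = split_by_structure_alt lyrics_text structure_markers
instance (lyrics_text : String) (structure_markers : Option (List (String × String))) (out : List (String × String)) : Decidable (Spec_split_by_structure lyrics_text structure_markers out) := by unfold Spec_split_by_structure; infer_instance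

-- ===== CLAIM (what is proved, stated in full; the proofs are below) =====
def Claim_equal_split_by_structure : Prop := ∀ (lyrics_text : String) (structure_markers : Option (List (String × String))), Dom_split_by_structure lyrics_text structure_markers → Spec_split_by_structure lyrics_text structure_markers (split_by_structure lyrics_text structure_markers)

-- ===== LEMMAS AND PROOFS =====

-- the two "flush then read back" finishers, named to keep the goals readable
def pvFinA (st : PySem.Dict String String × String × List String) : PySem.Dict String String :=
  pvFlushA st.1 st.2.1 st.2.2

def pvFinB (lines : List String) (st : PySem.Dict String String × String × Int) :
    PySem.Dict String String :=
  pvFlushA st.1 st.2.1 (PySem.List.slice lines (some st.2.2) none)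

-- common recursive description of "group the lines at marker lines"
def pvG (f : String → Option String) :
    PySem.Dict String String → String → List String → List String → PySem.Dict String String
  | d, cur, buf, [] => pvFlushA d cur buf
  | d, cur, buf, l :: ls =>
    match f l with
    | some name => pvG f (pvFlushA d cur buf) name [] ls
    | none => pvG f d cur (buf ++ [l]) ls

lemma pvFirstB_lowered (ms : List (String × String)) (line : String) :
    pvFirstB (ms.map (fun p => (PySem.Str.lower p.1, p.2))) (PySem.Str.lower line)
      = pvFindA ms line := by
  induction ms with
  | nil => rfl
  | cons hd tl ih =>
      obtain ⟨m, name⟩ := hd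
      simp only [List.map_cons, pvFirstB, pvFindA]
      split <;> simp [ih]

lemma A_fold_eq_pvG (markers : List (String × String)) :
    ∀ (ls : List String) (d : PySem.Dict String String) (cur : String) (buf : List String),
      pvFinA (ls.foldl (pvStepA markers) (d, cur, buf)) = pvG (pvFindA markers) d cur buf ls := by
  intro ls
  induction ls with
  | nil => intro d cur buf; rfl
  | cons l ls ih =>
      intro d cur buf
      simp only [List.foldl_cons]
      cases h : pvFindA markers l <;> simp [pvStepA, pvG, h, ih]

lemma marks_acc (lw : List (String × String)) :
    ∀ (xs : List (Int × String)) (acc : List (Int × String)),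
      xs.foldl (pvMarkStepB lw) acc = acc ++ xs.foldl (pvMarkStepB lw) [] := by
  intro xs
  induction xs with
  | nil => intro acc; simp
  | cons x xs ih =>
      intro acc
      simp only [List.foldl_cons]
      rw [ih (pvMarkStepB lw acc x), ih (pvMarkStepB lw [] x)]
      cases h : pvFirstB lw (PySem.Str.lower x.2) <;> simp [pvMarkStepB, h]

lemma B_core (lw : List (String × String)) (lines : List String) :
    ∀ (ls : List String) (k start : Nat) (d : PySem.Dict String String) (cur : String),
      lines.drop k = ls → start ≤ k →
      pvFinB lines (((PySem.List.enumerate ls ((k : Nat) : Int)).foldl (pvMarkStepB lw) []).foldl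
          (pvSecStepB lines) (d, cur, ((start : Nat) : Int)))
      = pvG (fun line => pvFirstB lw (PySem.Str.lower line)) d cur
          (PySem.List.slice lines (some ((start : Nat) : Int)) (some ((k : Nat) : Int))) ls := by
  intro ls
  induction ls with
  | nil =>
      intro k start d cur hdrop hle
      have hlen : lines.length ≤ k := by
        by_contra h
        have := List.drop_eq_nil_iff.mp hdrop
        omega
      simp only [PySem.List.enumerate_nil, List.foldl_nil, pvG, pvFinB,
        PySem.List.slice_from_natCast, PySem.List.slice_natCast]
      congr 1
      rw [List.take_of_length_le]
      simp; omega
  | cons l ls ih =>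
      intro k start d cur hdrop hle
      have hk : k < lines.length := by
        by_contra h
        rw [List.drop_eq_nil_iff.mpr (by omega)] at hdrop
        simp at hdrop
      have hget : lines[k]? = some l := by
        have h2 : (lines.drop k)[0]? = lines[k + 0]? := List.getElem?_drop
        rw [hdrop] at h2
        simpa using h2.symm
      have hdrop' : lines.drop (k + 1) = ls := by
        have h3 := congrArg List.tail hdrop
        rwa [List.tail_drop] at h3
      have hcast : ((k : Int) + 1) = (((k + 1 : Nat)) : Int) := by push_cast; ring
      rw [PySem.List.enumerate_cons, List.foldl_cons,
        marks_acc lw _ (pvMarkStepB lw [] ((k : Int), l))]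
      cases h : pvFirstB lw (PySem.Str.lower l) with
      | some name =>
          simp only [pvMarkStepB, h, List.nil_append, List.singleton_append, List.foldl_cons]
          have hstep : pvSecStepB lines (d, cur, ((start : Nat) : Int)) ((k : Int), name)
              = (pvFlushA d cur
                  (PySem.List.slice lines (some ((start : Nat) : Int)) (some ((k : Nat) : Int))),
                 name, (k : Int) + 1) := rfl
          rw [hstep, hcast,
            ih (k + 1) (k + 1) _ name hdrop' (le_refl _)]
          have h0 : PySem.List.slice lines (some (((k + 1 : Nat)) : Int))
              (some (((k + 1 : Nat)) : Int)) = [] := by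
            rw [PySem.List.slice_natCast]; simp
          rw [h0]
          simp [pvG, h]
      | none =>
          simp only [pvMarkStepB, h, List.nil_append]
          rw [hcast, ih (k + 1) start d cur hdrop' (by omega)]
          have hseg : PySem.List.slice lines (some ((start : Nat) : Int))
                (some (((k + 1 : Nat)) : Int))
              = PySem.List.slice lines (some ((start : Nat) : Int)) (some ((k : Nat) : Int))
                ++ [l] := by
            rw [PySem.List.slice_natCast, PySem.List.slice_natCast,
              show k + 1 - start = (k - start) + 1 by omega, List.take_add_one]
            congr 1
            rw [List.getElem?_drop, show start + (k - start) = k by omega, hget]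
            rfl
          rw [hseg]
          simp [pvG, h]

lemma pvKey (markers : List (String × String)) (lines : List String) :
    (pvFinB lines
        (((PySem.List.enumerate lines 0).foldl
            (pvMarkStepB (markers.map (fun p => (PySem.Str.lower p.1, p.2)))) []).foldl
          (pvSecStepB lines) (PySem.Dict.empty, "unlabeled", 0))).items
    = (pvFinA (lines.foldl (pvStepA markers) (PySem.Dict.empty, "unlabeled", []))).items := by
  have hB := B_core (markers.map (fun p => (PySem.Str.lower p.1, p.2))) lines lines 0 0
      PySem.Dict.empty "unlabeled" rfl (le_refl 0)
  have hf : (fun line => pvFirstB (markers.map (fun p => (PySem.Str.lower p.1, p.2)))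
      (PySem.Str.lower line)) = pvFindA markers := funext (pvFirstB_lowered markers)
  rw [hf] at hB
  have h0 : PySem.List.slice lines (some ((0 : Nat) : Int)) (some ((0 : Nat) : Int)) = [] := by
    rw [PySem.List.slice_natCast]; simp
  simp only [Nat.cast_zero] at h0
  simp only [Nat.cast_zero, h0] at hB
  rw [hB, ← A_fold_eq_pvG markers lines PySem.Dict.empty "unlabeled" []]

-- ===== VERDICT (by name: the statement is the Claim_ definition above) =====
theorem split_by_structure_spec : Claim_equal_split_by_structure := by
  intro lyrics_text structure_markers _
  unfold Spec_split_by_structure split_by_structure split_by_structure_alt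
  cases structure_markers with
  | none => exact (pvKey pvDefaults ((PySem.Str.split? lyrics_text "\n").getD [])).symm
  | some ms =>
      cases ms with
      | nil => exact (pvKey pvDefaults ((PySem.Str.split? lyrics_text "\n").getD [])).symm
      | cons h t => exact (pvKey (h :: t) ((PySem.Str.split? lyrics_text "\n").getD [])).symm
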